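-- pv_equiv track=rewrite | github.com/Harish761/thehgtech | update_shorts.py | is_zero_day
-- ===== SOURCE A (Python) =====
-- def is_zero_day(description):
--     """
--     Check if CVE description mentions zero-day
--     Returns True if zero-day patterns found (adjacent words only)
--     """
--     if not description:
--         return False
--
--     text = description.lower()
--
--     # Zero-day patterns (official terminology only)
--     zero_day_patterns = [
--         'zero-day',      # Most common in official docs
--         'zero day',      # Also common
--         'zeroday'        # Less common but used
--     ]
--
--     return any(pattern in text for pattern in zero_day_patterns)
-- ===== SOURCE B (Python) =====
-- def is_zero_day(description):
--     """
--     Check if CVE description mentions zero-day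
--     Returns True if zero-day patterns found (adjacent words only)
--     """
--     if not description:
--         return False
--     text = description.lower()
--     for i in range(len(text)):
--         if text.startswith('zero', i):
--             j = i + 4
--             if j < len(text) and text[j] in '- ':
--                 j += 1
--             if text.startswith('day', j):
--                 return True
--     return False
-- ===== Notes on version B (the rewrite author's own statement) =====
-- stated objective: alternative
-- what changed: Replaced the three separate substring-membership tests any(p in text) by a single left-to-right scan that at each position matches the keyword, an optional single hyphen-or-space separator, then the suffix word (the union of the three literals as one pass).
import Mathlib
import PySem

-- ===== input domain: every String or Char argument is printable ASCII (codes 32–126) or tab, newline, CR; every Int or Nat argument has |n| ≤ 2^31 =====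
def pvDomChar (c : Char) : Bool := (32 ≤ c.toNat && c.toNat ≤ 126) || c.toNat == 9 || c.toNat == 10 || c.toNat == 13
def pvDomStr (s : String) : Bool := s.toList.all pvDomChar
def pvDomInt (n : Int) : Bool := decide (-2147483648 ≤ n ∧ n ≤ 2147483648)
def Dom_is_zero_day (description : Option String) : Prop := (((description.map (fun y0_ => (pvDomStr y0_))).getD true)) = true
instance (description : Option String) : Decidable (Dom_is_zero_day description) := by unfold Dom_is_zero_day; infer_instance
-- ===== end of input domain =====

-- B replaces the three-literal `any(pattern in text)` membership test by a single
-- left-to-right scan matching keyword + optional single separator + suffix word at each position (objective: alternative).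

-- ===== PORT A =====
def is_zero_day (description : Option String) : Bool :=
  match description with
  | none => false
  | some d =>
    if d = "" then false
    else
      let text := PySem.Str.lower d
      (["zero-day", "zero day", "zeroday"]).any (fun p => PySem.Str.isIn p text)

-- ===== PORT B =====
-- text.startswith('day', j) at the scan point
def pvMatchDay : List Char → Bool
  | 'd' :: 'a' :: 'y' :: _ => true
  | _ => false

-- the optional single separator, then the suffix word
def pvMatchTail : List Char → Bool
  | '-' :: rest => pvMatchDay rest
  | ' ' :: rest => pvMatchDay rest
  | rest => pvMatchDay rest

-- text.startswith('zero', i) then the tail match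
def pvMatchAt : List Char → Bool
  | 'z' :: 'e' :: 'r' :: 'o' :: rest => pvMatchTail rest
  | _ => false

-- the `for i in range(len(text))` scan, as recursion over suffixes
def pvScan : List Char → Bool
  | [] => false
  | c :: t => pvMatchAt (c :: t) || pvScan t

def is_zero_day_alt (description : Option String) : Bool :=
  match description with
  | none => false
  | some d =>
    if d = "" then false
    else pvScan (PySem.Chars.lower d.toList)

-- ===== PRECONDITION & SPEC =====
def Spec_is_zero_day (description : Option String) (out : Bool) : Prop := out = is_zero_day_alt description
instance (description : Option String) (out : Bool) : Decidable (Spec_is_zero_day description out) := by unfold Spec_is_zero_day; infer_instance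

-- ===== CLAIM (what is proved, stated in full; the proofs are below) =====
def Claim_equal_is_zero_day : Prop := ∀ (description : Option String), Dom_is_zero_day description → Spec_is_zero_day description (is_zero_day description)

-- ===== LEMMAS AND PROOFS =====

theorem pvMatchDay_iff (t : List Char) :
    pvMatchDay t = true ↔ ['d','a','y'] <+: t := by
  constructor
  · intro h
    unfold pvMatchDay at h
    split at h
    · rename_i rest; exact ⟨rest, rfl⟩
    · simp at h
  · rintro ⟨r, rfl⟩; rfl

theorem pvMatchTail_iff (t : List Char) :
    pvMatchTail t = true ↔
      (['-','d','a','y'] <+: t ∨ [' ','d','a','y'] <+: t ∨ ['d','a','y'] <+: t) := by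
  constructor
  · intro h
    unfold pvMatchTail at h
    split at h
    · rename_i rest
      rcases (pvMatchDay_iff rest).mp h with ⟨r, rfl⟩
      exact Or.inl ⟨r, rfl⟩
    · rename_i rest
      rcases (pvMatchDay_iff rest).mp h with ⟨r, rfl⟩
      exact Or.inr (Or.inl ⟨r, rfl⟩)
    · exact Or.inr (Or.inr ((pvMatchDay_iff t).mp h))
  · rintro (⟨r, rfl⟩ | ⟨r, rfl⟩ | h)
    · rfl
    · rfl
    · rcases h with ⟨r, rfl⟩; rfl

theorem pvMatchAt_iff (t : List Char) :
    pvMatchAt t = true ↔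
      ("zero-day".toList <+: t ∨ "zero day".toList <+: t ∨ "zeroday".toList <+: t) := by
  constructor
  · intro h
    unfold pvMatchAt at h
    split at h
    · rename_i rest
      rcases (pvMatchTail_iff rest).mp h with ⟨r, rfl⟩ | ⟨r, rfl⟩ | ⟨r, rfl⟩
      · exact Or.inl ⟨r, rfl⟩
      · exact Or.inr (Or.inl ⟨r, rfl⟩)
      · exact Or.inr (Or.inr ⟨r, rfl⟩)
    · simp at h
  · rintro (⟨r, rfl⟩ | ⟨r, rfl⟩ | ⟨r, rfl⟩)
    · rfl
    · rfl
    · rfl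

theorem pvScan_iff (cs : List Char) :
    pvScan cs = true ↔ ∃ t, t <:+ cs ∧ pvMatchAt t = true := by
  induction cs with
  | nil =>
    simp only [pvScan]
    constructor
    · intro h; simp at h
    rintro ⟨t, ht, hm⟩
    rw [List.suffix_nil.mp ht] at hm
    simp [pvMatchAt] at hm
  | cons c rest ih =>
    simp only [pvScan, Bool.or_eq_true, ih]
    constructor
    · rintro (h | ⟨t, ht, hm⟩)
      · exact ⟨c :: rest, List.suffix_refl _, h⟩
      · exact ⟨t, ht.trans (List.suffix_cons c rest), hm⟩
    · rintro ⟨t, ht, hm⟩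
      rcases List.suffix_cons_iff.mp ht with rfl | ht'
      · exact Or.inl hm
      · exact Or.inr ⟨t, ht', hm⟩

theorem pvScan_eq_infix (cs : List Char) :
    pvScan cs = true ↔
      ("zero-day".toList <:+: cs ∨ "zero day".toList <:+: cs ∨ "zeroday".toList <:+: cs) := by
  rw [pvScan_iff]
  constructor
  · rintro ⟨t, ht, hm⟩
    rcases (pvMatchAt_iff t).mp hm with h | h | h
    · exact Or.inl (List.infix_iff_prefix_suffix.mpr ⟨t, h, ht⟩)
    · exact Or.inr (Or.inl (List.infix_iff_prefix_suffix.mpr ⟨t, h, ht⟩))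
    · exact Or.inr (Or.inr (List.infix_iff_prefix_suffix.mpr ⟨t, h, ht⟩))
  · rintro (h | h | h) <;>
      rcases List.infix_iff_prefix_suffix.mp h with ⟨t, hp, hs⟩
    · exact ⟨t, hs, (pvMatchAt_iff t).mpr (Or.inl hp)⟩
    · exact ⟨t, hs, (pvMatchAt_iff t).mpr (Or.inr (Or.inl hp))⟩
    · exact ⟨t, hs, (pvMatchAt_iff t).mpr (Or.inr (Or.inr hp))⟩

-- ===== VERDICT (by name: the statement is the Claim_ definition above) =====
theorem is_zero_day_spec : Claim_equal_is_zero_day := by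
  intro description _
  unfold Spec_is_zero_day is_zero_day is_zero_day_alt
  match description with
  | none => rfl
  | some d =>
    by_cases hd : d = ""
    · simp [hd]
    · simp only [hd, if_false, List.any_cons, List.any_nil, Bool.or_false]
      rw [Bool.eq_iff_iff]
      simp only [Bool.or_eq_true, PySem.Str.isIn_eq, PySem.Chars.isIn_iff_infix,
        PySem.Str.toList_lower, pvScan_eq_infix]
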